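-- pv_equiv track=rewrite | github.com/sjhhh3/Leetcode | Leecode/leetcode821.py | plalindrome
-- ===== SOURCE A (Python) =====
-- def plalindrome(num):
--     plist = []
--     for k in range(1, num+1):
--         if k <= num/2:
--             plist.append(k)
--         else:
--             plist.append(num-k+1)
--     return plist
-- ===== SOURCE B (Python) =====
-- def plalindrome(num):
--     half = num // 2
--     up = list(range(1, half + 1))
--     mid = [half + 1] if num > 0 and num % 2 else []
--     return up + mid + up[::-1]
-- ===== Notes on version B (the rewrite author's own statement) =====
-- stated objective: alternative
-- what changed: Instead of one loop over all num positions with a per-index branch, B builds only the ascending first half once (range(1, num//2+1)), adds the single middle peak for odd num, and mirrors the half with a reversed copy.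
import Mathlib
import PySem

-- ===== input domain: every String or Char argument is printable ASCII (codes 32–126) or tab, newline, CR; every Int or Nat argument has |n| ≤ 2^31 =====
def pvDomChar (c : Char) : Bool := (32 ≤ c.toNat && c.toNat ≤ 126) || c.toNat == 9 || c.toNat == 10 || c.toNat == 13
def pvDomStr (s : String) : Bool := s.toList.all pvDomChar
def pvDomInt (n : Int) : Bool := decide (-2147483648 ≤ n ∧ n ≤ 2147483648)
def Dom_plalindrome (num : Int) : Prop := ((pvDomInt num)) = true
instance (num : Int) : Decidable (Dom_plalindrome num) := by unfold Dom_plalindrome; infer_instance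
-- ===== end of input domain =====

-- B builds the ascending first half once, adds the odd middle peak, and mirrors the half,
-- instead of A's single loop over every index with a per-position branch.

-- ===== PORT A =====
-- Python's 'k <= num/2' is a float comparison; for the integers k, num of Dom it is exact and
-- equivalent to the integer comparison '2*k <= num' used here.
def plalindrome (num : Int) : List Int :=
  (PySem.List.pyRange 1 (num + 1) 1).foldl
    (fun plist k => if 2 * k ≤ num then plist ++ [k] else plist ++ [num - k + 1]) []

-- ===== PORT B =====
def plalindrome_alt (num : Int) : List Int :=
  let half := PySem.Int.floordiv num 2
  let up := PySem.List.pyRange 1 (half + 1) 1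
  let mid := if 0 < num ∧ PySem.Int.mod num 2 ≠ 0 then [half + 1] else []
  up ++ mid ++ up.reverse

-- ===== PRECONDITION & SPEC =====
def Spec_plalindrome (num : Int) (out : List Int) : Prop := out = plalindrome_alt num
instance (num : Int) (out : List Int) : Decidable (Spec_plalindrome num out) := by unfold Spec_plalindrome; infer_instance

-- ===== CLAIM (what is proved, stated in full; the proofs are below) =====
def Claim_equal_plalindrome : Prop := ∀ (num : Int), Dom_plalindrome num → Spec_plalindrome num (plalindrome num)

-- ===== LEMMAS AND PROOFS =====

-- A's loop is the map of the branch function over range(1, num+1).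
lemma plalindrome_eq_map (num : Int) :
    plalindrome num
      = (PySem.List.pyRange 1 (num + 1) 1).map
          (fun k => if 2 * k ≤ num then k else num - k + 1) := by
  unfold plalindrome
  have hfun : (fun (plist : List Int) k => if 2 * k ≤ num then plist ++ [k] else plist ++ [num - k + 1])
      = fun plist k => plist ++ [if 2 * k ≤ num then k else num - k + 1] := by
    funext plist k; split <;> rfl
  rw [hfun]
  exact PySem.List.foldl_append_singleton_eq_map
    (l := PySem.List.pyRange 1 (num + 1) 1)
    (f := fun k => if 2 * k ≤ num then k else num - k + 1) (acc := [])


-- mapping the reflection k ↦ num - k + 1 over [h+1, …, num] gives the countdown [num-h, …, 1]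
lemma map_reflect (num h : Int) :
    (PySem.List.pyRange (h + 1) (num + 1) 1).map (fun k => num - k + 1)
      = PySem.List.pyRange (num - h) 0 (-1) := by
  rw [PySem.List.pyRange_one, PySem.List.pyRange_neg_one, List.map_map]
  have hlen : (num + 1 - (h + 1)).toNat = (num - h - 0).toNat := by omega
  rw [hlen]
  apply List.map_congr_left
  intro k _
  simp only [Function.comp_apply]
  ring

lemma main_eq (num : Int) : plalindrome num = plalindrome_alt num := by
  rw [plalindrome_eq_map]
  unfold plalindrome_alt
  have hfd : PySem.Int.floordiv num 2 = num / 2 :=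
    PySem.Int.floordiv_eq_ediv_of_pos (by norm_num)
  have hmd : PySem.Int.mod num 2 = num % 2 :=
    PySem.Int.mod_eq_emod_of_pos (by norm_num)
  by_cases hpos : 0 < num
  · -- positive num: split the range at h+1 = num/2 + 1
    set h : Int := num / 2 with hh
    have hsplit := PySem.List.pyRange_one_append 1 (h + 1) (num + 1)
      (by omega) (by omega)
    rw [hsplit, List.map_append]
    have hup : (PySem.List.pyRange 1 (h + 1) 1).map
        (fun k => if 2 * k ≤ num then k else num - k + 1)
        = PySem.List.pyRange 1 (h + 1) 1 := by
      rw [show (PySem.List.pyRange 1 (h + 1) 1).map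
            (fun k => if 2 * k ≤ num then k else num - k + 1)
          = (PySem.List.pyRange 1 (h + 1) 1).map id from
        List.map_congr_left (fun k hk => by
          rw [PySem.List.mem_pyRange_one] at hk
          simp only [id]
          rw [if_pos (by omega)])]
      exact List.map_id _
    have hdown : (PySem.List.pyRange (h + 1) (num + 1) 1).map
        (fun k => if 2 * k ≤ num then k else num - k + 1)
        = (PySem.List.pyRange (h + 1) (num + 1) 1).map (fun k => num - k + 1) :=
      List.map_congr_left (fun k hk => by
        rw [PySem.List.mem_pyRange_one] at hk
        rw [if_neg (by omega)])
    rw [hup, hdown, map_reflect, PySem.List.pyRange_neg_one_eq_reverse]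
    by_cases hodd : num % 2 = 0
    · have : num - h + 1 = h + 1 := by omega
      rw [this]
      simp [hodd, hh, hpos]
    · have h2 : num - h + 1 = (h + 1) + 1 := by omega
      rw [h2, show ((0:Int) + 1) = 1 from rfl,
        PySem.List.pyRange_one_succ_right (by omega : (1:Int) ≤ h + 1),
        List.reverse_append]
      simp [hodd, hh, hpos]
  · -- num ≤ 0: every list involved is empty
    have e1 : PySem.List.pyRange 1 (num + 1) 1 = [] :=
      PySem.List.pyRange_one_eq_nil (by omega)
    have e2 : PySem.List.pyRange 1 (num / 2 + 1) 1 = [] :=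
      PySem.List.pyRange_one_eq_nil (by omega)
    simp [e1, e2, hpos]

-- ===== VERDICT (by name: the statement is the Claim_ definition above) =====
theorem plalindrome_spec : Claim_equal_plalindrome := by
  intro num _
  exact main_eq num
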